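-- pv_equiv track=rewrite | github.com/datnim24/1_Thesis | MILP_Test_v2/model.py | _extract_windows
-- ===== SOURCE A (Python) =====
-- def _extract_windows(slots: set[int]) -> list[tuple[int, int]]:
--     if not slots:
--         return []
--
--     ordered = sorted(slots)
--     windows: list[tuple[int, int]] = []
--     start = ordered[0]
--     previous = ordered[0]
--     for slot in ordered[1:]:
--         if slot == previous + 1:
--             previous = slot
--             continue
--         windows.append((start, previous))
--         start = slot
--         previous = slot
--     windows.append((start, previous))
--     return windows
-- ===== SOURCE B (Python) =====
-- def _extract_windows(slots):
--     starts = sorted(x for x in slots if x - 1 not in slots)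
--     ends = sorted(x for x in slots if x + 1 not in slots)
--     return list(zip(starts, ends))
-- ===== Notes on version B (the rewrite author's own statement) =====
-- stated objective: alternative
-- what changed: Instead of sorting and threading a start/previous state machine over adjacent elements, B characterizes windows by set membership alone: the starts are the elements x with x-1 not in the set, the ends those with x+1 not in the set; sort each and zip them.
import Mathlib
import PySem

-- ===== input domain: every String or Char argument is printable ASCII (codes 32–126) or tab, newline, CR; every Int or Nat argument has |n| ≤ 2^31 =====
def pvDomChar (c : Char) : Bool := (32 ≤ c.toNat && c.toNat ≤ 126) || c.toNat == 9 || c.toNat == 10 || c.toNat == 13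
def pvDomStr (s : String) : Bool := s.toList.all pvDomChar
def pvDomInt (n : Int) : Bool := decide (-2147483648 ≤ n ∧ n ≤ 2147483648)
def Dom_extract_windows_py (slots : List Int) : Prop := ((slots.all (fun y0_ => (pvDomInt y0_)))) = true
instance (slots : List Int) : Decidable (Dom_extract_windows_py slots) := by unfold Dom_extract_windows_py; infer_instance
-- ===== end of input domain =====

-- B drops A's start/previous state machine entirely: a window start is an element x with x-1 not in
-- the set and a window end one with x+1 not in the set; sort each and zip (alternative; same cost).


-- ===== PORT A =====
def extract_windows_py (slots : List Int) : List (Int × Int) :=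
  if slots = [] then []
  else
    match PySem.List.sorted slots (fun x => x) false with
    | [] => []   -- unreachable: sorted of a nonempty list is nonempty
    | h :: t =>
      let st := t.foldl
        (fun (s : List (Int × Int) × Int × Int) slot =>
          if slot = s.2.2 + 1 then (s.1, s.2.1, slot)
          else (s.1 ++ [(s.2.1, s.2.2)], slot, slot))
        ([], h, h)
      st.1 ++ [(st.2.1, st.2.2)]

-- ===== PORT B =====
def extract_windows_py_alt (slots : List Int) : List (Int × Int) :=
  let starts := PySem.List.sorted (slots.filter (fun x => !(decide ((x - 1) ∈ slots)))) (fun x => x) false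
  let ends := PySem.List.sorted (slots.filter (fun x => !(decide ((x + 1) ∈ slots)))) (fun x => x) false
  List.zip starts ends

-- ===== PRECONDITION & SPEC =====
-- Pre_ only records that the list models A's Python parameter, a set[int]: its elements are distinct.
-- It excludes no input the Python A accepts (a set cannot hold duplicates).
def Pre_extract_windows_py (slots : List Int) : Prop := slots.Nodup
instance (slots : List Int) : Decidable (Pre_extract_windows_py slots) := by unfold Pre_extract_windows_py; infer_instance
def pvWitness_extract_windows_py : List Int := [1, 2, 5]

def Spec_extract_windows_py (slots : List Int) (out : List (Int × Int)) : Prop := out = extract_windows_py_alt slots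
instance (slots : List Int) (out : List (Int × Int)) : Decidable (Spec_extract_windows_py slots out) := by unfold Spec_extract_windows_py; infer_instance

-- ===== CLAIM (what is proved, stated in full; the proofs are below) =====
def Claim_equal_extract_windows_py : Prop := ∀ (slots : List Int), Dom_extract_windows_py slots → Pre_extract_windows_py slots → Spec_extract_windows_py slots (extract_windows_py slots)

-- ===== LEMMAS AND PROOFS =====

-- A's loop, as a recursion on the remaining slots (state: current window's start and previous).
def pvLoop (start prev : Int) : List Int → List (Int × Int)
  | [] => [(start, prev)]
  | s :: rest => if s = prev + 1 then pvLoop start s rest else (start, prev) :: pvLoop s s rest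

-- A's foldl (with the final append) equals pvLoop, prefixed by the accumulator.
lemma pvFold_eq (l : List Int) (acc : List (Int × Int)) (st pv : Int) :
    (let r := l.foldl
        (fun (s : List (Int × Int) × Int × Int) slot =>
          if slot = s.2.2 + 1 then (s.1, s.2.1, slot)
          else (s.1 ++ [(s.2.1, s.2.2)], slot, slot)) (acc, st, pv)
     r.1 ++ [(r.2.1, r.2.2)]) = acc ++ pvLoop st pv l := by
  induction l generalizing acc st pv with
  | nil => simp [pvLoop]
  | cons s rest ih =>
    by_cases h : s = pv + 1 <;>
      simp [pvLoop, List.foldl_cons, h, ih, List.append_assoc]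

-- The gap-break pairs of a list: adjacent pairs (a, b) with b ≠ a + 1.
def pvGaps (l : List Int) : List (Int × Int) :=
  (List.zip l l.tail).filter (fun p => p.2 ≠ p.1 + 1)

-- pvLoop equals the zip of gap-break successors/predecessors on the list prev :: l.
lemma pvLoop_eq (start prev : Int) (l : List Int) :
    pvLoop start prev l =
      List.zip (start :: (pvGaps (prev :: l)).map Prod.snd)
               ((pvGaps (prev :: l)).map Prod.fst ++ [(prev :: l).getLastD 0]) := by
  induction l generalizing start prev with
  | nil => simp [pvLoop, pvGaps]
  | cons s rest ih =>
    by_cases h : s = prev + 1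
    · simp only [pvLoop, if_pos h]
      rw [ih]
      simp [pvGaps, List.zip, h]
    · simp only [pvLoop, if_neg h]
      rw [ih]
      simp [pvGaps, List.zip, h]

-- On a strictly increasing list, the elements x with x-1 absent are the head and the gap successors.
lemma pvStarts_eq (h : Int) (t : List Int) (hp : (h :: t).Pairwise (· < ·)) :
    (h :: t).filter (fun x => !(decide ((x - 1) ∈ h :: t))) =
      h :: (pvGaps (h :: t)).map Prod.snd := by
  induction t generalizing h with
  | nil =>
    simp [pvGaps]
  | cons b t' ih =>
    have hb : h < b := (List.pairwise_cons.1 hp).1 b (by simp)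
    have hall : ∀ x ∈ t', b < x := (List.pairwise_cons.1 (List.pairwise_cons.1 hp).2).1
    have hallh : ∀ x ∈ b :: t', h < x := (List.pairwise_cons.1 hp).1
    have ihb := ih b (List.pairwise_cons.1 hp).2
    have hh : ¬ ((h : Int) - 1 ∈ h :: b :: t') := by
      intro hm
      rcases List.mem_cons.1 hm with e | hm'
      · omega
      · have := hallh _ hm'; omega
    have hbm : ¬ ((b : Int) - 1 ∈ b :: t') := by
      intro hm
      rcases List.mem_cons.1 hm with e | hm'
      · omega
      · have := hall _ hm'; omega
    have hcongr : ∀ x ∈ t',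
        (!(decide ((x - 1) ∈ h :: b :: t'))) = (!(decide ((x - 1) ∈ b :: t'))) := by
      intro x hx
      have hxb := hall x hx
      have hne : ¬ ((x : Int) - 1 = h) := by omega
      simp [List.mem_cons, hne]
    have hpb : ((b : Int) - 1 ∈ h :: b :: t') ↔ b = h + 1 := by
      constructor
      · intro hm
        rcases List.mem_cons.1 hm with e | hm'
        · omega
        · exact absurd hm' hbm
      · intro e
        exact List.mem_cons.2 (Or.inl (by omega))
    have hfb' : (!(decide ((b : Int) - 1 ∈ b :: t'))) = true := by simp [hbm]
    have htail : t'.filter (fun x => !(decide ((x - 1) ∈ b :: t'))) =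
        (pvGaps (b :: t')).map Prod.snd := by
      simp only [List.filter_cons, hfb', if_true] at ihb
      injection ihb
    have hgap : pvGaps (h :: b :: t') =
        (if b = h + 1 then [] else [(h, b)]) ++ pvGaps (b :: t') := by
      by_cases e : b = h + 1 <;> simp [pvGaps, List.zip, e]
    have hfh : (!(decide ((h : Int) - 1 ∈ h :: b :: t'))) = true := by simp [hh]
    have hfb : (!(decide ((b : Int) - 1 ∈ h :: b :: t'))) = (!(decide (b = h + 1))) := by
      simp [hpb]
    simp only [List.filter_cons, hfh, hfb, if_true, List.filter_congr hcongr, htail, hgap]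
    by_cases e : b = h + 1 <;> simp [e]

-- On a strictly increasing list, the elements x with x+1 absent are the gap predecessors and the last.
lemma pvEnds_eq (h : Int) (t : List Int) (hp : (h :: t).Pairwise (· < ·)) :
    (h :: t).filter (fun x => !(decide ((x + 1) ∈ h :: t))) =
      (pvGaps (h :: t)).map Prod.fst ++ [(h :: t).getLastD 0] := by
  induction t generalizing h with
  | nil =>
    simp [pvGaps]
  | cons b t' ih =>
    have hb : h < b := (List.pairwise_cons.1 hp).1 b (by simp)
    have hall : ∀ x ∈ t', b < x := (List.pairwise_cons.1 (List.pairwise_cons.1 hp).2).1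
    have ihb := ih b (List.pairwise_cons.1 hp).2
    have hph : ((h : Int) + 1 ∈ h :: b :: t') ↔ b = h + 1 := by
      constructor
      · intro hm
        rcases List.mem_cons.1 hm with e | hm'
        · omega
        · rcases List.mem_cons.1 hm' with e' | hm''
          · omega
          · have := hall _ hm''; omega
      · intro e
        exact List.mem_cons.2 (Or.inr (List.mem_cons.2 (Or.inl (by omega))))
    have hcongr : ∀ x ∈ b :: t',
        (!(decide ((x + 1) ∈ h :: b :: t'))) = (!(decide ((x + 1) ∈ b :: t'))) := by
      intro x hx
      have hxb : b ≤ x := by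
        rcases List.mem_cons.1 hx with e | hm'
        · omega
        · have := hall _ hm'; omega
      have hne : ¬ ((x : Int) + 1 = h) := by omega
      simp [List.mem_cons, hne]
    have hgap : pvGaps (h :: b :: t') =
        (if b = h + 1 then [] else [(h, b)]) ++ pvGaps (b :: t') := by
      by_cases e : b = h + 1 <;> simp [pvGaps, List.zip, e]
    have hfh : (!(decide ((h : Int) + 1 ∈ h :: b :: t'))) = (!(decide (b = h + 1))) := by
      simp [hph]
    simp only [List.filter_cons, hfh, List.filter_congr hcongr, ihb, hgap]
    by_cases e : b = h + 1 <;> simp [e]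

-- sorted(filter) is filter(sorted): both are strictly-increasing rearrangements of the same list.
lemma pvSortedFilter (slots : List Int) (hnd : slots.Nodup) (p : Int → Bool) :
    PySem.List.sorted (slots.filter p) (fun x => x) false =
      (PySem.List.sorted slots (fun x => x) false).filter p := by
  have hperm : (PySem.List.sorted slots (fun x => x) false).Perm slots :=
    PySem.List.sorted_perm slots (fun x => x) false
  have hpw : (PySem.List.sorted slots (fun x => x) false).Pairwise (· < ·) := by
    have hle : (PySem.List.sorted slots (fun x => x) false).Pairwise (fun a b => a ≤ b) :=
      PySem.List.sorted_pairwise slots (fun x => x)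
    have hnd' : (PySem.List.sorted slots (fun x => x) false).Nodup := hperm.nodup_iff.2 hnd
    exact (hle.and hnd').imp (fun hx => lt_of_le_of_ne hx.1 hx.2)
  exact PySem.List.sorted_eq_of_perm_of_pairwise_lt _ _ _ (hperm.filter p) (hpw.filter p)

-- ===== VERDICT (by name: the statement is the Claim_ definition above) =====
theorem extract_windows_py_spec : Claim_equal_extract_windows_py := by
  intro slots _ hnd
  unfold Spec_extract_windows_py extract_windows_py extract_windows_py_alt
  simp only [pvSortedFilter slots hnd]
  have hperm : (PySem.List.sorted slots (fun x => x) false).Perm slots :=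
    PySem.List.sorted_perm slots (fun x => x) false
  have hpw : (PySem.List.sorted slots (fun x => x) false).Pairwise (· < ·) := by
    have hle : (PySem.List.sorted slots (fun x => x) false).Pairwise (fun a b => a ≤ b) :=
      PySem.List.sorted_pairwise slots (fun x => x)
    have hnd' : (PySem.List.sorted slots (fun x => x) false).Nodup := hperm.nodup_iff.2 hnd
    exact (hle.and hnd').imp (fun hx => lt_of_le_of_ne hx.1 hx.2)
  have hmem : ∀ y : Int, (y ∈ slots) ↔ y ∈ PySem.List.sorted slots (fun x => x) false :=
    fun y => hperm.mem_iff.symm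
  by_cases hs : slots = []
  · subst hs
    simp [PySem.List.sorted]
  · have hne : PySem.List.sorted slots (fun x => x) false ≠ [] := by
      simpa [PySem.List.sorted_eq_nil_iff] using hs
    cases hsort : PySem.List.sorted slots (fun x => x) false with
    | nil => exact absurd hsort hne
    | cons h t =>
      rw [hsort] at hpw hmem
      simp only [if_neg hs]
      have hA := pvFold_eq t [] h h
      simp only [List.nil_append] at hA
      rw [hA, pvLoop_eq]
      have hc1 : (h :: t).filter (fun x => !(decide ((x - 1) ∈ slots))) =
          (h :: t).filter (fun x => !(decide ((x - 1) ∈ h :: t))) :=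
        List.filter_congr (fun x _ => by simp [hmem (x - 1)])
      have hc2 : (h :: t).filter (fun x => !(decide ((x + 1) ∈ slots))) =
          (h :: t).filter (fun x => !(decide ((x + 1) ∈ h :: t))) :=
        List.filter_congr (fun x _ => by simp [hmem (x + 1)])
      rw [hc1, hc2, pvStarts_eq h t hpw, pvEnds_eq h t hpw]
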